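-- pv_equiv track=rewrite | github.com/Isoft-Consulting/syntrexpowers | rag-universal-experimental/rag_universal/core.py | path_has_excluded_dir
-- ===== SOURCE A (Python) =====
-- from typing import Any
--
-- def path_has_excluded_dir(rel_path: str, config: dict[str, Any]) -> bool:
--     excluded = set(str(item) for item in config.get("exclude_dirs", []))
--     parts = rel_path.split("/")[:-1]
--     for index, part in enumerate(parts):
--         prefix = "/".join(parts[: index + 1])
--         if part in excluded or prefix in excluded:
--             return True
--     return False
-- ===== SOURCE B (Python) =====
-- def path_has_excluded_dir(rel_path: str, config) -> bool:
--     excluded = set(str(item) for item in config.get("exclude_dirs", []))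
--     comp = ""
--     prefix = ""
--     for ch in rel_path:
--         if ch == "/":
--             if comp in excluded or prefix in excluded:
--                 return True
--             prefix += "/"
--             comp = ""
--         else:
--             comp += ch
--             prefix += ch
--     return False
-- ===== Notes on version B (the rewrite author's own statement) =====
-- stated objective: alternative
-- what changed: Replaces A's split/enumerate/re-join scan (which splits the path and rebuilds each prefix with '/'.join of a slice) by a single character-level pass over the path that maintains the current component and the running prefix incrementally and checks them at each '/'.
import Mathlib
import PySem

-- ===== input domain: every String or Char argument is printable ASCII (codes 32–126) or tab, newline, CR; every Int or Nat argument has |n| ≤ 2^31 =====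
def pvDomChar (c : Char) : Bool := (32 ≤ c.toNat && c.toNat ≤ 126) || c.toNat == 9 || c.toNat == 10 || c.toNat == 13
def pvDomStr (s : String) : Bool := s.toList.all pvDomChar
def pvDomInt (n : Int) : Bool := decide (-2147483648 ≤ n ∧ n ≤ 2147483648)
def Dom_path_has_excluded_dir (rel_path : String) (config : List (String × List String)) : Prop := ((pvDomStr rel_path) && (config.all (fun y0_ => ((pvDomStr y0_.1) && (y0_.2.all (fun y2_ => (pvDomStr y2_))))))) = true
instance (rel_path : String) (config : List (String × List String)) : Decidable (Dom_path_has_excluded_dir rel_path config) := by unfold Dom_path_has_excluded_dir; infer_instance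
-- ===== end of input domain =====

-- B replaces A's split/enumerate/re-join scan by a single character-level pass that builds the
-- current component and the running prefix incrementally (objective: alternative); equal on all inputs.

-- ===== PORT A =====
-- the for-loop with early return, over enumerate(parts)
def pvAGo (excluded : PySem.Set String) (parts : List String) : List (Int × String) → Bool
  | [] => false
  | (index, part) :: rest =>
    let pfx := PySem.Str.join "/" (PySem.List.slice parts none (some (index + 1)))
    if PySem.Set.contains excluded part || PySem.Set.contains excluded pfx then true
    else pvAGo excluded parts rest

def path_has_excluded_dir (rel_path : String) (config : List (String × List String)) : Bool :=
  -- str(item) is the identity here: the items are already strings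
  let excluded : PySem.Set String := PySem.Set.ofList ((PySem.Dict.mk config).getD "exclude_dirs" [])
  -- sep "/" is nonempty, so split? is always `some`; .getD [] just unwraps it
  let parts := PySem.List.slice ((PySem.Str.split? rel_path "/").getD []) none (some (-1))
  pvAGo excluded parts (PySem.List.enumerate parts 0)

-- ===== PORT B =====
-- the character loop: comp is the component being built, pre the whole prefix so far
def pvBGo (excluded : PySem.Set String) : List Char → List Char → List Char → Bool
  | [], _, _ => false
  | c :: rest, comp, pre =>
    if c = '/' then
      if PySem.Set.contains excluded (String.ofList comp) || PySem.Set.contains excluded (String.ofList pre) then true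
      else pvBGo excluded rest [] (pre ++ ['/'])
    else pvBGo excluded rest (comp ++ [c]) (pre ++ [c])

def path_has_excluded_dir_alt (rel_path : String) (config : List (String × List String)) : Bool :=
  let excluded : PySem.Set String := PySem.Set.ofList ((PySem.Dict.mk config).getD "exclude_dirs" [])
  pvBGo excluded rel_path.toList [] []

-- ===== PRECONDITION & SPEC =====
def Spec_path_has_excluded_dir (rel_path : String) (config : List (String × List String)) (out : Bool) : Prop := out = path_has_excluded_dir_alt rel_path config
instance (rel_path : String) (config : List (String × List String)) (out : Bool) : Decidable (Spec_path_has_excluded_dir rel_path config out) := by unfold Spec_path_has_excluded_dir; infer_instance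

-- ===== CLAIM (what is proved, stated in full; the proofs are below) =====
def Claim_equal_path_has_excluded_dir : Prop := ∀ (rel_path : String) (config : List (String × List String)), Dom_path_has_excluded_dir rel_path config → Spec_path_has_excluded_dir rel_path config (path_has_excluded_dir rel_path config)

-- ===== LEMMAS AND PROOFS =====

-- split on '/' at the character level
def charSplit : List Char → List (List Char)
  | [] => [[]]
  | c :: rest =>
    if c = '/' then [] :: charSplit rest
    else match charSplit rest with
      | h :: t => (c :: h) :: t
      | [] => [[c]]

lemma charSplit_ne_nil (cs : List Char) : charSplit cs ≠ [] := by
  cases cs with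
  | nil => simp [charSplit]
  | cons c rest =>
    simp only [charSplit]
    split
    · simp
    · split <;> simp

def mergeHead (pre : List Char) : List (List Char) → List (List Char)
  | [] => [pre]
  | h :: t => (pre ++ h) :: t

lemma splitOn_go_eq (fuel : ℕ) : ∀ (l cur : List Char) (acc : List (List Char)), l.length < fuel →
    PySem.Chars.splitOn.go ['/'] fuel l cur acc = acc.reverse ++ mergeHead cur.reverse (charSplit l) := by
  induction fuel with
  | zero => intro l cur acc h; omega
  | succ n ih =>
    intro l cur acc h
    cases l with
    | nil => simp [PySem.Chars.splitOn.go, charSplit, mergeHead]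
    | cons c rest =>
      rw [PySem.Chars.splitOn.go]
      by_cases hc : c = '/'
      · subst hc
        have hp : List.isPrefixOf ['/'] ('/' :: rest) = true := by simp [List.isPrefixOf]
        simp only [hp, if_true, List.length_cons, List.drop_succ_cons, List.length_nil, List.drop_zero]
        rw [ih rest [] (cur.reverse :: acc) (by simpa using Nat.lt_of_succ_lt_succ h)]
        rcases hr : charSplit rest with _ | ⟨h1, t1⟩
        · exact absurd hr (charSplit_ne_nil rest)
        · simp [charSplit, mergeHead, hr]
      · have hp : List.isPrefixOf ['/'] (c :: rest) = false := by
          simp only [List.isPrefixOf, Bool.and_eq_false_iff, beq_eq_false_iff_ne, ne_eq]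
          exact Or.inl (fun h => hc (Eq.symm h))
        simp only [hp, if_false, Bool.false_eq_true]
        rw [ih rest (c :: cur) acc (by simpa using Nat.lt_of_succ_lt_succ h)]
        simp only [charSplit, hc, if_false]
        rcases hcs : charSplit rest with _ | ⟨h1, t1⟩
        · exact absurd hcs (charSplit_ne_nil rest)
        · simp [mergeHead]

lemma splitOn_eq_charSplit (cs : List Char) : PySem.Chars.splitOn cs ['/'] = charSplit cs := by
  rw [PySem.Chars.splitOn, splitOn_go_eq (cs.length + 1) cs [] [] (by omega)]
  rcases h : charSplit cs with _ | ⟨a, b⟩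
  · exact absurd h (charSplit_ne_nil cs)
  · simp [mergeHead]

-- the common shape: scan the component list, carrying the prefix text
def chk (ex : PySem.Set String) (pre : List Char) : List (List Char) → Bool
  | [] => false
  | [_] => false
  | c :: r :: t =>
    if PySem.Set.contains ex (String.ofList c) || PySem.Set.contains ex (String.ofList (pre ++ c)) then true
    else chk ex (pre ++ c ++ ['/']) (r :: t)

lemma pvBGo_eq_chk (ex : PySem.Set String) : ∀ (cs comp pre : List Char),
    pvBGo ex cs comp (pre ++ comp) = chk ex pre (mergeHead comp (charSplit cs)) := by
  intro cs
  induction cs with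
  | nil => intro comp pre; simp [pvBGo, charSplit, mergeHead, chk]
  | cons c rest ih =>
    intro comp pre
    by_cases hc : c = '/'
    · subst hc
      simp only [pvBGo, charSplit, reduceIte]
      rcases h : charSplit rest with _ | ⟨h1, t1⟩
      · exact absurd h (charSplit_ne_nil rest)
      · rw [show mergeHead comp ([] :: h1 :: t1) = (comp ++ []) :: h1 :: t1 from rfl]
        simp only [List.append_nil, chk]
        split_ifs with hcond
        · rfl
        · simpa [h, mergeHead] using ih [] (pre ++ comp ++ ['/'])
    · simp only [pvBGo, if_neg hc, charSplit]
      have := ih (comp ++ [c]) pre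
      rw [show pre ++ comp ++ [c] = pre ++ (comp ++ [c]) from by simp, this]
      rcases h : charSplit rest with _ | ⟨h1, t1⟩
      · exact absurd h (charSplit_ne_nil rest)
      · simp [mergeHead]

-- '/'-intercalation in the two-case shape chk recurses on
def icat : List (List Char) → List Char
  | [] => []
  | [x] => x
  | x :: y :: t => x ++ '/' :: icat (y :: t)

lemma icat_eq_intercalate : ∀ xs : List (List Char), icat xs = List.intercalate ['/'] xs
  | [] => by simp [icat, List.intercalate]
  | [x] => by simp [icat, List.intercalate]
  | x :: y :: t => by
    have := icat_eq_intercalate (y :: t)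
    simp only [icat, this]
    simp [List.intercalate, List.intersperse]

-- chk as an existential over indices
lemma chk_iff (ex : PySem.Set String) : ∀ (comps : List (List Char)) (pre : List Char),
    chk ex pre comps = true ↔ ∃ k : ℕ, ∃ _hk : k + 1 < comps.length,
      (String.ofList comps[k] ∈ ex ∨
       String.ofList (pre ++ icat (comps.take (k + 1))) ∈ ex) := by
  intro comps
  induction comps with
  | nil => intro pre; simp [chk]
  | cons c rest ih =>
    intro pre
    cases rest with
    | nil =>
      simp only [chk, List.length_cons, List.length_nil]
      constructor
      · intro h; exact absurd h (by simp)
      · rintro ⟨k, hk, -⟩; omega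
    | cons r t =>
      simp only [chk]
      split_ifs with hcond
      · refine iff_of_true rfl ⟨0, by simp, ?_⟩
        simp only [List.getElem_cons_zero, List.take_succ_cons, List.take_zero, icat]
        simpa [PySem.Set.contains_iff] using hcond
      · replace hcond : String.ofList c ∉ ex ∧ String.ofList (pre ++ c) ∉ ex := by
          simpa [PySem.Set.contains_iff, not_or] using hcond
        rw [ih (pre ++ c ++ ['/'])]
        constructor
        · rintro ⟨k, hk, hmem⟩
          refine ⟨k + 1, by simp at hk ⊢; omega, ?_⟩
          have htake : (c :: r :: t).take (k + 1 + 1) = c :: ((r :: t).take (k + 1)) := by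
            simp
          have hic : icat ((c :: r :: t).take (k + 1 + 1))
              = c ++ '/' :: icat ((r :: t).take (k + 1)) := by
            rw [htake]
            simp [icat]
          rcases hmem with h | h
          · exact Or.inl (by simpa using h)
          · refine Or.inr ?_
            rw [hic]
            simpa [List.append_assoc] using h
        · rintro ⟨k, hk, hmem⟩
          rcases k with _ | j
          · -- k = 0 contradicts hcond
            exfalso
            simp only [List.getElem_cons_zero, List.take_succ_cons, List.take_zero, icat] at hmem
            rcases hmem with h | h
            · exact hcond.1 (by simpa [PySem.Set.contains_iff] using h)
            · exact hcond.2 (by simpa [PySem.Set.contains_iff] using h)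
          · refine ⟨j, by simp at hk ⊢; omega, ?_⟩
            have hic : icat ((c :: r :: t).take (j + 1 + 1))
                = c ++ '/' :: icat ((r :: t).take (j + 1)) := by
              simp only [List.take_succ_cons]
              simp [icat]
            rcases hmem with h | h
            · exact Or.inl (by simpa using h)
            · refine Or.inr ?_
              rw [hic] at h
              simpa [List.append_assoc] using h

-- A as the same existential
lemma pvAGo_eq_any (excluded : PySem.Set String) (parts : List String)
    (l : List (Int × String)) :
    pvAGo excluded parts l = l.any (fun p =>
      PySem.Set.contains excluded p.2 ||
      PySem.Set.contains excluded (PySem.Str.join "/" (PySem.List.slice parts none (some (p.1 + 1))))) := by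
  induction l with
  | nil => rfl
  | cons h t ih =>
    obtain ⟨i, s⟩ := h
    simp only [pvAGo, List.any_cons, ih]
    split
    · simp_all
    · simp_all

-- the A-side existential, from the enumerate loop
lemma pvA_iff (ex : PySem.Set String) (parts : List String) :
    pvAGo ex parts (PySem.List.enumerate parts 0) = true ↔ ∃ k : ℕ, ∃ _hk : k < parts.length,
      (parts[k] ∈ ex ∨
       PySem.Str.join "/" (PySem.List.slice parts none (some ((k : Int) + 1))) ∈ ex) := by
  rw [pvAGo_eq_any]
  simp only [List.any_eq_true, PySem.Set.contains_iff, PySem.List.mem_enumerate_iff,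
    Bool.or_eq_true]
  constructor
  · rintro ⟨p, ⟨k, hk, rfl⟩, h⟩
    exact ⟨k, hk, by simpa using h⟩
  · rintro ⟨k, hk, h⟩
    exact ⟨((k : Int), parts[k]), ⟨k, hk, by simp⟩, by simpa using h⟩

-- exact Str.join on mapped components equals ofList of icat
lemma join_ofList (xs : List (List Char)) :
    PySem.Str.join "/" (xs.map String.ofList) = String.ofList (icat xs) := by
  apply String.toList_inj.mp
  rw [PySem.Str.toList_join]
  simp only [List.map_map]
  have hmap : xs.map (fun l => (String.ofList l).toList) = xs := by
    simp
  rw [show (String.toList ∘ String.ofList) = (fun l : List Char => (String.ofList l).toList) from rfl,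
    hmap, icat_eq_intercalate]
  simp [PySem.Chars.join]

-- B's loop equals chk on the full component list
lemma pvB_eq_chk (ex : PySem.Set String) (cs : List Char) :
    pvBGo ex cs [] [] = chk ex [] (charSplit cs) := by
  have h := pvBGo_eq_chk ex cs [] []
  simp only [List.append_nil] at h
  rw [h]
  rcases hc : charSplit cs with _ | ⟨h1, t1⟩
  · exact absurd hc (charSplit_ne_nil cs)
  · simp [mergeHead]

-- A's parts list is the dropLast of the character split, mapped to String
lemma parts_eq (rel_path : String) :
    PySem.List.slice ((PySem.Str.split? rel_path "/").getD []) none (some (-1))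
      = (charSplit rel_path.toList).dropLast.map String.ofList := by
  have hsplit : (PySem.Str.split? rel_path "/").getD []
      = (charSplit rel_path.toList).map String.ofList := by
    simp [PySem.Str.split?, PySem.Chars.split?, splitOn_eq_charSplit]
  rw [hsplit, PySem.List.slice_to_neg_one, ← List.map_dropLast]

-- take of dropLast below the last element
lemma take_dropLast {α : Type} (l : List α) (m : ℕ) (h : m ≤ l.length - 1) :
    l.dropLast.take m = l.take m := by
  rw [List.dropLast_eq_take, List.take_take]
  congr 1
  omega

-- ===== VERDICT (by name: the statement is the Claim_ definition above) =====
theorem path_has_excluded_dir_spec : Claim_equal_path_has_excluded_dir := by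
  intro rel_path config _
  unfold Spec_path_has_excluded_dir path_has_excluded_dir path_has_excluded_dir_alt
  rw [parts_eq, pvB_eq_chk, Bool.eq_iff_iff, pvA_iff, chk_iff]
  have hne := charSplit_ne_nil rel_path.toList
  generalize hcomps : charSplit rel_path.toList = comps at *
  have hL : 1 ≤ comps.length := by
    cases comps with
    | nil => exact absurd rfl hne
    | cons a b => simp
  constructor
  · rintro ⟨k, hk, h⟩
    simp only [List.length_map, List.length_dropLast] at hk
    refine ⟨k, by omega, ?_⟩
    have hk1 : k + 1 ≤ comps.length - 1 := by omega
    rcases h with h | h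
    · refine Or.inl ?_
      have : ((comps.dropLast.map String.ofList))[k]'(by simp; omega)
          = String.ofList comps[k] := by
        simp [List.getElem_dropLast]
      rwa [this] at h
    · refine Or.inr ?_
      have hslice : PySem.List.slice (comps.dropLast.map String.ofList) none (some ((k : Int) + 1))
          = ((comps.take (k + 1)).map String.ofList) := by
        have : ((k : Int) + 1) = ((k + 1 : ℕ) : Int) := by push_cast; ring
        rw [this, PySem.List.slice_to_natCast, ← List.map_take, take_dropLast _ _ hk1]
      rw [hslice, join_ofList] at h
      simpa using h
  · rintro ⟨k, hk, h⟩
    refine ⟨k, by simp; omega, ?_⟩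
    have hk1 : k + 1 ≤ comps.length - 1 := by omega
    rcases h with h | h
    · refine Or.inl ?_
      have : ((comps.dropLast.map String.ofList))[k]'(by simp; omega)
          = String.ofList comps[k] := by
        simp [List.getElem_dropLast]
      rwa [this]
    · refine Or.inr ?_
      have hslice : PySem.List.slice (comps.dropLast.map String.ofList) none (some ((k : Int) + 1))
          = ((comps.take (k + 1)).map String.ofList) := by
        have : ((k : Int) + 1) = ((k + 1 : ℕ) : Int) := by push_cast; ring
        rw [this, PySem.List.slice_to_natCast, ← List.map_take, take_dropLast _ _ hk1]
      rw [hslice, join_ofList]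
      simpa using h
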